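-- pv_equiv track=rewrite | github.com/sunmarknatecom/graduschool | segspect.py | find_sig_index
-- ===== SOURCE A (Python) =====
-- def find_sig_index(arr):
--     ranges = []
--     start = None
--     for i, elem in enumerate(arr):
--         if elem != 0:
--             if start is None:
--                 start = i
--         else:
--             if start is not None:
--                 ranges.append((start, i))
--                 start = None
--     if start is not None:
--         ranges.append((start, len(arr)))
--     return ranges
-- ===== SOURCE B (Python) =====
-- def find_sig_index(arr):
--     ranges = []
--     i = 0
--     n = len(arr)
--     while i < n:
--         if arr[i] != 0:
--             j = i
--             while j < n and arr[j] != 0: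
--                 j += 1
--             ranges.append((i, j))
--             i = j
--         else:
--             i += 1
--     return ranges
-- ===== Notes on version B (the rewrite author's own statement) =====
-- stated objective: alternative
-- what changed: Replaces A's per-element state machine (Optional start sentinel plus a post-loop flush) with two-pointer run scanning: an outer loop that skips zeros and an inner loop that consumes each whole nonzero run, emitting its (start, end) directly.
import Mathlib
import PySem

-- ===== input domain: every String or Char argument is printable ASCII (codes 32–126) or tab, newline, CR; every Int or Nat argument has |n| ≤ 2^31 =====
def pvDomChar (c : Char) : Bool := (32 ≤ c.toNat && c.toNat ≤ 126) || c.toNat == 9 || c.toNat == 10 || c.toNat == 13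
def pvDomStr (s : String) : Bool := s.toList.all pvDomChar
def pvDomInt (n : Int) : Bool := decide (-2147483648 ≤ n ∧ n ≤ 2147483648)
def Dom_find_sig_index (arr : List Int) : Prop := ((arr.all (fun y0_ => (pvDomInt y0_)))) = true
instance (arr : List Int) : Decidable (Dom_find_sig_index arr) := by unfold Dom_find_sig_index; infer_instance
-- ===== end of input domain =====

-- B replaces A's per-element start-sentinel state machine with two-pointer run scanning (alternative decomposition, same cost).


-- ===== PORT A =====
-- A's loop over enumerate(arr) carrying (ranges, start); the final 'if start is not None' flush is the base case.
def pvAGo (n : Nat) : List Int → Nat → List (Int × Int) → Option Nat → List (Int × Int)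
  | [], _, ranges, start =>
      match start with
      | some s => ranges ++ [((s : Int), (n : Int))]
      | none => ranges
  | x :: xs, i, ranges, start =>
      if x ≠ 0 then
        match start with
        | none => pvAGo n xs (i + 1) ranges (some i)
        | some _ => pvAGo n xs (i + 1) ranges start
      else
        match start with
        | some s => pvAGo n xs (i + 1) (ranges ++ [((s : Int), (i : Int))]) none
        | none => pvAGo n xs (i + 1) ranges none

def find_sig_index (arr : List Int) : List (Int × Int) :=
  pvAGo arr.length arr 0 [] none

-- ===== PORT B =====
-- B's outer while loop: skip a zero, or consume the whole nonzero run (inner while = takeWhile) and emit (i, j).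
def pvBGo : List Int → Nat → List (Int × Int)
  | [], _ => []
  | x :: xs, i =>
      if x ≠ 0 then
        let run := xs.takeWhile (· ≠ 0)
        ((i : Int), ((i + 1 + run.length : Nat) : Int)) ::
          pvBGo (xs.drop run.length) (i + 1 + run.length)
      else
        pvBGo xs (i + 1)
  termination_by xs _ => xs.length
  decreasing_by
    · simp
    · simp

def find_sig_index_alt (arr : List Int) : List (Int × Int) :=
  pvBGo arr 0

-- ===== PRECONDITION & SPEC =====
def Spec_find_sig_index (arr : List Int) (out : List (Int × Int)) : Prop := out = find_sig_index_alt arr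
instance (arr : List Int) (out : List (Int × Int)) : Decidable (Spec_find_sig_index arr out) := by unfold Spec_find_sig_index; infer_instance

-- ===== CLAIM (what is proved, stated in full; the proofs are below) =====
def Claim_equal_find_sig_index : Prop := ∀ (arr : List Int), Dom_find_sig_index arr → Spec_find_sig_index arr (find_sig_index arr)

-- ===== LEMMAS AND PROOFS =====

-- Joint invariant of A's state machine: with start = none it produces exactly B's runs from index i;
-- with start = some s it first closes the open run at the end of the current nonzero prefix.
theorem pvAGo_inv (n : Nat) (xs : List Int) :
    (∀ (i : Nat) (R : List (Int × Int)), i + xs.length = n →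
        pvAGo n xs i R none = R ++ pvBGo xs i) ∧
    (∀ (i : Nat) (R : List (Int × Int)) (s : Nat), i + xs.length = n →
        pvAGo n xs i R (some s) =
          R ++ [((s : Int), ((i + (xs.takeWhile (· ≠ 0)).length : Nat) : Int))] ++
            pvBGo (xs.drop (xs.takeWhile (· ≠ 0)).length)
              (i + (xs.takeWhile (· ≠ 0)).length)) := by
  induction xs with
  | nil =>
      constructor
      · intro i R h; simp [pvAGo, pvBGo]
      · intro i R s h; simp at h; subst h; simp [pvAGo, pvBGo]
  | cons x xs ih =>
      obtain ⟨ihN, ihS⟩ := ih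
      constructor
      · intro i R h
        by_cases hx : x = 0
        · simp only [pvAGo, pvBGo, hx]
          simp only [ne_eq, not_true_eq_false, if_false]
          exact ihN (i + 1) R (by simp at h ⊢; omega)
        · simp only [pvAGo, pvBGo, hx, ne_eq, not_false_eq_true, if_true]
          rw [ihS (i + 1) R i (by simp at h ⊢; omega)]
          simp [Nat.add_assoc, Nat.add_comm 1]
      · intro i R s h
        by_cases hx : x = 0
        · simp only [pvAGo, hx, ne_eq, not_true_eq_false, if_false]
          rw [ihN (i + 1) (R ++ [((s : Int), (i : Int))]) (by simp at h ⊢; omega)]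
          have htw : (x :: xs).takeWhile (· ≠ 0) = [] := by simp [hx]
          simp [pvBGo]
        · have htw : (x :: xs).takeWhile (· ≠ 0) = x :: xs.takeWhile (· ≠ 0) := by
            simp [hx]
          simp only [pvAGo, hx, ne_eq, not_false_eq_true, if_true]
          rw [ihS (i + 1) R s (by simp at h ⊢; omega)]
          rw [htw]
          simp [List.drop_succ_cons, Nat.add_assoc, Nat.add_comm 1]

-- ===== VERDICT (by name: the statement is the Claim_ definition above) =====
theorem find_sig_index_spec : Claim_equal_find_sig_index := by
  intro arr _
  unfold Spec_find_sig_index find_sig_index find_sig_index_alt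
  exact (pvAGo_inv arr.length arr).1 0 [] (by simp)
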